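-- pv_equiv track=rewrite | github.com/zrohyun/PS | Python/programmers/bruteforce_1.py | solution
-- ===== SOURCE A (Python) =====
-- def solution(answers):
--     answer = []
--     person1 = [1,2,3,4,5]
--     person2 = [2,1,2,3,2,4,2,5]
--     person3 = [3,3,1,1,2,2,4,4,5,5]
--     ans = [0,0,0]
--     for n,i in enumerate(answers):
--         if person1[n%5] == i:
--             ans[0] += 1
--
--         if person2[n%len(person2)] == i:
--             ans[1] += 1
--
--         if person3[n%len(person3)] == i:
--             ans[2] += 1
--
--
--     if set(ans) ==1:
--         answer = [1,2,3]
--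
--     else:
--         for n,a in enumerate(ans):
--             if a == max(set(ans)):
--                 answer.append(n+1)
--
--     return answer
-- ===== SOURCE B (Python) =====
-- def solution(answers):
--     # Histogram by residue class: all three patterns are periodic with period dividing 40,
--     # so a table cnt[(i % 40, a)] determines every score without re-scanning the answers.
--     patterns = [[1, 2, 3, 4, 5],
--                 [2, 1, 2, 3, 2, 4, 2, 5],
--                 [3, 3, 1, 1, 2, 2, 4, 4, 5, 5]]
--     cnt = {}
--     for i, a in enumerate(answers):
--         key = (i % 40, a)
--         cnt[key] = cnt.get(key, 0) + 1
--     scores = [sum(cnt.get((r, pat[r % len(pat)]), 0) for r in range(40))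
--               for pat in patterns]
--     best = max(scores)
--     return [i + 1 for i, s in enumerate(scores) if s == best]
-- ===== Notes on version B (the rewrite author's own statement) =====
-- stated objective: alternative
-- what changed: B replaces A's per-element pattern comparisons with a histogram keyed by (index mod 40, answer) built in one pass (40 = lcm of the pattern periods); each score is then read off by summing 40 table lookups, and the dead 'set(ans)==1' branch disappears.
import Mathlib
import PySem

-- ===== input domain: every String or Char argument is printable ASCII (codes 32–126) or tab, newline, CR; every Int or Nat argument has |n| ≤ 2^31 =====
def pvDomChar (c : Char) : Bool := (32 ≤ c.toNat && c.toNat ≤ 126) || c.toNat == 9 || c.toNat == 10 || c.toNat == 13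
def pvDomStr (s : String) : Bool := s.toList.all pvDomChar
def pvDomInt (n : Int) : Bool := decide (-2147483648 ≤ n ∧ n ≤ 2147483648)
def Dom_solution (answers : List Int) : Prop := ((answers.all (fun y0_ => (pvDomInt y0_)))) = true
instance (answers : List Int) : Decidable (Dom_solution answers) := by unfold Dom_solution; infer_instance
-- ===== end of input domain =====

-- B replaces A's per-element pattern comparisons with a histogram keyed by (index mod 40, answer)
-- built in one pass; each score is then a sum of 40 table lookups (alternative algorithm, same cost).


-- ===== PORT A =====
-- literal transliteration of A: one fused loop over enumerate(answers) updating the triple ans,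
-- then `set(ans) == 1` (a set compared with an int: always False in Python, kept as `if False`),
-- then the append loop over enumerate(ans) comparing with max(set(ans)).
def solution (answers : List Int) : List Int :=
  let person1 : List Int := [1, 2, 3, 4, 5]
  let person2 : List Int := [2, 1, 2, 3, 2, 4, 2, 5]
  let person3 : List Int := [3, 3, 1, 1, 2, 2, 4, 4, 5, 5]
  let ans : Int × Int × Int :=
    (PySem.List.enumerate answers 0).foldl
      (fun a ni =>
        let a0 := if PySem.List.pyGetD person1 (PySem.Int.mod ni.1 5) 0 = ni.2 then a.1 + 1 else a.1
        let a1 := if PySem.List.pyGetD person2 (PySem.Int.mod ni.1 (person2.length : Int)) 0 = ni.2 then a.2.1 + 1 else a.2.1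
        let a2 := if PySem.List.pyGetD person3 (PySem.Int.mod ni.1 (person3.length : Int)) 0 = ni.2 then a.2.2 + 1 else a.2.2
        (a0, a1, a2))
      (0, 0, 0)
  let ansL : List Int := [ans.1, ans.2.1, ans.2.2]
  if False then [1, 2, 3]   -- Python's `set(ans) == 1` compares a set with an int: always False
  else
    -- max(set(ans)); ansL is nonempty so max? is never none
    let m : Int := (PySem.List.max? (PySem.Set.ofList ansL) (fun y => y)).getD 0
    (PySem.List.enumerate ansL 0).foldl
      (fun answer na => if na.2 = m then answer ++ [na.1 + 1] else answer) []

-- ===== PORT B =====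
def solution_alt (answers : List Int) : List Int :=
  let patterns : List (List Int) :=
    [[1, 2, 3, 4, 5], [2, 1, 2, 3, 2, 4, 2, 5], [3, 3, 1, 1, 2, 2, 4, 4, 5, 5]]
  -- cnt[(i % 40, a)] = cnt.get((i % 40, a), 0) + 1  over enumerate(answers)
  let cnt : PySem.Dict (Int × Int) Int :=
    (PySem.List.enumerate answers 0).foldl
      (fun d ia => d.insert (PySem.Int.mod ia.1 40, ia.2)
                    (d.getD (PySem.Int.mod ia.1 40, ia.2) 0 + 1))
      PySem.Dict.empty
  -- scores = [sum(cnt.get((r, pat[r % len(pat)]), 0) for r in range(40)) for pat in patterns]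
  let scores : List Int := patterns.map (fun pat =>
    (PySem.List.pyRange 0 40 1).foldl
      (fun s r => s + cnt.getD (r, PySem.List.pyGetD pat (PySem.Int.mod r (pat.length : Int)) 0) 0) 0)
  let best : Int := (PySem.List.max? scores (fun y => y)).getD 0
  (PySem.List.enumerate scores 0).filterMap
    (fun is => if is.2 = best then some (is.1 + 1) else none)

-- ===== PRECONDITION & SPEC =====
def Spec_solution (answers : List Int) (out : List Int) : Prop := out = solution_alt answers
instance (answers : List Int) (out : List Int) : Decidable (Spec_solution answers out) := by unfold Spec_solution; infer_instance

-- ===== CLAIM (what is proved, stated in full; the proofs are below) =====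
def Claim_equal_solution : Prop := ∀ (answers : List Int), Dom_solution answers → Spec_solution answers (solution answers)

-- ===== LEMMAS AND PROOFS =====

-- A's fused loop computes, componentwise, three independent counting folds.
theorem pv_fused_eq_three (answers : List Int) (s a0 a1 a2 : Int) :
    (PySem.List.enumerate answers s).foldl
      (fun (a : Int × Int × Int) ni =>
        ((if PySem.List.pyGetD [1, 2, 3, 4, 5] (PySem.Int.mod ni.1 5) 0 = ni.2 then a.1 + 1 else a.1),
         (if PySem.List.pyGetD [2, 1, 2, 3, 2, 4, 2, 5] (PySem.Int.mod ni.1 8) 0 = ni.2 then a.2.1 + 1 else a.2.1),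
         (if PySem.List.pyGetD [3, 3, 1, 1, 2, 2, 4, 4, 5, 5] (PySem.Int.mod ni.1 10) 0 = ni.2 then a.2.2 + 1 else a.2.2)))
      (a0, a1, a2)
    = ((PySem.List.enumerate answers s).foldl
         (fun acc ia => acc + (if ia.2 = PySem.List.pyGetD [1, 2, 3, 4, 5] (PySem.Int.mod ia.1 5) 0 then 1 else 0)) a0,
       (PySem.List.enumerate answers s).foldl
         (fun acc ia => acc + (if ia.2 = PySem.List.pyGetD [2, 1, 2, 3, 2, 4, 2, 5] (PySem.Int.mod ia.1 8) 0 then 1 else 0)) a1,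
       (PySem.List.enumerate answers s).foldl
         (fun acc ia => acc + (if ia.2 = PySem.List.pyGetD [3, 3, 1, 1, 2, 2, 4, 4, 5, 5] (PySem.Int.mod ia.1 10) 0 then 1 else 0)) a2) := by
  have hif : ∀ (P v a : Int), (if P = v then a + 1 else a) = a + (if v = P then 1 else 0) := by
    intro P v a
    by_cases h : P = v
    · simp [h]
    · rw [if_neg h, if_neg (fun e => h e.symm), add_zero]
  induction answers generalizing s a0 a1 a2 with
  | nil => simp [PySem.List.enumerate_nil]
  | cons x xs ih =>
      simp only [PySem.List.enumerate_cons, List.foldl_cons]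
      rw [ih]
      rw [hif, hif, hif]

-- one pass of the range: the indicator of `(r0, v) = (r, g r)` sums to the single hit at r = r0.
theorem pv_sum_ind (g : Int → Int) (v r0 : Int) : ∀ (n : Nat) (lo : Int),
    ((PySem.List.pyRange lo (lo + n) 1).map
       (fun r => if ((r0, v) : Int × Int) = (r, g r) then (1:Int) else 0)).sum
    = if lo ≤ r0 ∧ r0 < lo + n ∧ v = g r0 then 1 else 0 := by
  intro n
  induction n with
  | zero =>
      intro lo
      rw [show ((0:Nat):Int) = 0 by norm_num, add_zero,
          PySem.List.pyRange_one_eq_nil (le_refl lo)]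
      simp only [List.map_nil, List.sum_nil]
      split_ifs with h
      · omega
      · rfl
  | succ k ih =>
      intro lo
      have hsplit : PySem.List.pyRange lo (lo + ((k+1 : Nat) : Int)) 1
          = PySem.List.pyRange lo (lo + k) 1 ++ [lo + k] := by
        rw [show (((k+1:Nat)):Int) = (k:Int) + 1 by push_cast; ring,
            show lo + ((k:Int) + 1) = (lo + (k:Int)) + 1 by ring]
        exact PySem.List.pyRange_one_succ_right (by omega)
      rw [hsplit, List.map_append, List.sum_append, ih]
      simp only [List.map_cons, List.map_nil, List.sum_cons, List.sum_nil, Prod.mk.injEq]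
      by_cases h1 : r0 = lo + k
      · subst h1
        by_cases h2 : v = g (lo + k) <;> simp [h2] <;> split_ifs <;> push_cast <;> omega
      · have hno : ¬ (r0 = lo + k ∧ v = g (lo + k)) := by tauto
        simp only [hno, if_false, add_zero]
        split_ifs with ha hb hb <;> first | rfl | (exfalso; push_cast at ha hb ⊢; omega)

-- summing histogram lookups over all residues recovers the per-element indicator sum.
theorem pv_sum_count (g : Int → Int) (L : List (Int × Int)) (h : ∀ p ∈ L, 0 ≤ p.1) :
    ((PySem.List.pyRange 0 40 1).map
       (fun r => ((List.count ((r, g r) : Int × Int)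
                    (L.map (fun ia => ((PySem.Int.mod ia.1 40, ia.2) : Int × Int))) : Nat) : Int))).sum
    = (L.map (fun ia => if ia.2 = g (PySem.Int.mod ia.1 40) then (1:Int) else 0)).sum := by
  induction L with
  | nil => simp
  | cons x xs ih =>
      have hxs : ∀ p ∈ xs, 0 ≤ p.1 := fun p hp => h p (by simp [hp])
      simp only [List.map_cons, List.count_cons, List.sum_cons, beq_iff_eq]
      push_cast
      rw [PySem.List.sum_map_add_int, ih hxs]
      have hr0 : (0:Int) ≤ PySem.Int.mod x.1 40 := PySem.Int.mod_nonneg x.1 (by norm_num)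
      have hr1 : PySem.Int.mod x.1 40 < 40 := PySem.Int.mod_lt x.1 (by norm_num)
      have hind := pv_sum_ind g x.2 (PySem.Int.mod x.1 40) 40 0
      rw [show ((0:Int) + ((40:Nat):Int)) = 40 by norm_num] at hind
      rw [hind]
      simp only [hr0, hr1, true_and]
      ring

-- composing the residue: (i % 40) % m = i % m when m divides 40.
theorem pv_mod_mod (i m : Int) (hm : 0 < m) (hdvd : m ∣ 40) :
    PySem.Int.mod (PySem.Int.mod i 40) m = PySem.Int.mod i m := by
  rw [PySem.Int.mod_eq_emod_of_pos (show (0:Int) < 40 by norm_num),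
      PySem.Int.mod_eq_emod_of_pos hm, PySem.Int.mod_eq_emod_of_pos hm]
  exact Int.emod_emod_of_dvd i hdvd

-- B's histogram score for one pattern equals A's per-pattern counting fold.
theorem pv_score_eq (answers : List Int) (pat : List Int) (m : Int) (hm : 0 < m) (hdvd : m ∣ 40) :
    ((PySem.List.pyRange 0 40 1).foldl
      (fun s r => s +
        ((PySem.List.enumerate answers 0).foldl
          (fun d ia => d.insert (PySem.Int.mod ia.1 40, ia.2)
                        (d.getD (PySem.Int.mod ia.1 40, ia.2) 0 + 1))
          (PySem.Dict.empty : PySem.Dict (Int × Int) Int)).getD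
          (r, PySem.List.pyGetD pat (PySem.Int.mod r m) 0) 0) 0)
    = (PySem.List.enumerate answers 0).foldl
        (fun acc ia => acc + (if ia.2 = PySem.List.pyGetD pat (PySem.Int.mod ia.1 m) 0 then 1 else 0)) 0 := by
  have h1 : ((PySem.List.enumerate answers 0).map
          (fun ia : Int × Int => ((PySem.Int.mod ia.1 40, ia.2) : Int × Int))).foldl
          (fun (d : PySem.Dict (Int × Int) Int) x => d.insert x (d.getD x 0 + 1)) PySem.Dict.empty
      = (PySem.List.enumerate answers 0).foldl
        (fun d ia => d.insert (PySem.Int.mod ia.1 40, ia.2)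
                      (d.getD (PySem.Int.mod ia.1 40, ia.2) 0 + 1)) PySem.Dict.empty := List.foldl_map
  rw [← h1]
  rw [PySem.List.foldl_add, PySem.List.foldl_add]
  simp only [PySem.Dict.getD_foldl_insert_add_one, PySem.Dict.getD_empty, zero_add]
  rw [pv_sum_count (fun r => PySem.List.pyGetD pat (PySem.Int.mod r m) 0) _ ?hpos]
  case hpos =>
    intro p hp
    rcases (PySem.List.mem_enumerate_iff _ _ _).1 hp with ⟨k, hk, rfl⟩
    simp
  apply congrArg
  apply List.map_congr_left
  intro ia hia
  rw [pv_mod_mod ia.1 m hm hdvd]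

-- max over the deduplicated triple equals max over the triple.
theorem pv_max_dedup (s0 s1 s2 : Int) :
    (PySem.List.max? (PySem.Set.ofList [s0, s1, s2]) (fun y => y)).getD 0
      = (PySem.List.max? [s0, s1, s2] (fun y => y)).getD 0 := by
  by_cases h1 : s1 = s0 <;> by_cases h2 : s2 = s0 <;> by_cases h3 : s2 = s1 <;>
    simp [PySem.Set.ofList, PySem.List.max?, h1, h2, h3,
          apply_ite (fun o : Option Int => o.getD 0)] <;>
    split_ifs <;> simp_all <;> split_ifs <;> simp_all <;> omega

-- the final selection over a concrete triple: A's append loop = B's filterMap comprehension.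
theorem pv_select (s0 s1 s2 m : Int) :
    (PySem.List.enumerate [s0, s1, s2] 0).foldl
      (fun answer na => if na.2 = m then answer ++ [na.1 + 1] else answer) ([] : List Int)
      = (PySem.List.enumerate [s0, s1, s2] 0).filterMap
          (fun is => if is.2 = m then some (is.1 + 1) else none) := by
  simp only [PySem.List.enumerate_cons, PySem.List.enumerate_nil, List.foldl_cons,
    List.foldl_nil, List.filterMap_cons, List.filterMap_nil]
  split_ifs <;> simp

-- ===== VERDICT (by name: the statement is the Claim_ definition above) =====
theorem solution_spec : Claim_equal_solution := by
  intro answers _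
  show solution answers = solution_alt answers
  unfold solution solution_alt
  simp only [List.map_cons, List.map_nil, if_false,
    show (([1,2,3,4,5] : List Int).length : Int) = 5 from by norm_num,
    show (([2,1,2,3,2,4,2,5] : List Int).length : Int) = 8 from by norm_num,
    show (([3,3,1,1,2,2,4,4,5,5] : List Int).length : Int) = 10 from by norm_num]
  rw [pv_fused_eq_three]
  rw [pv_score_eq answers [1,2,3,4,5] 5 (by norm_num) (by norm_num),
      pv_score_eq answers [2,1,2,3,2,4,2,5] 8 (by norm_num) (by norm_num),
      pv_score_eq answers [3,3,1,1,2,2,4,4,5,5] 10 (by norm_num) (by norm_num)]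
  rw [pv_max_dedup, pv_select]
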